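-- pv_equiv track=rewrite | github.com/Klaudia1303/student_code_analysis | Progetto-tirocinio2024/data/student_data/2065099_Mastrantonio/LabPython08/A_Ex1.py | A_Ex1
-- ===== SOURCE A (Python) =====
-- def A_Ex1(l):
--     contamax = 0
--     chr_finale = 'a'
--     for i in range(len(l)):
--         parola = l[i]
--         for j in range (len(parola)):
--             lettera = parola[j]
--             conta = 0
--             for k in range (len(l)):
--                 if lettera in l[k] and parola[j].islower():
--                     conta = conta + 1
--             if conta > contamax :
--                 contamax = conta
--                 chr_finale = lettera
--             elif conta == contamax :
--                 if lettera > chr_finale :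
--                     contamax = conta
--                     chr_finale = lettera
--     return (chr_finale)
-- ===== SOURCE B (Python) =====
-- def A_Ex1(l):
--     counts = {}
--     for w in l:
--         for c in set(w):
--             if c.islower():
--                 counts[c] = counts.get(c, 0) + 1
--     if not counts:
--         return 'a'
--     return max(counts, key=lambda c: (counts[c], c))
-- ===== Notes on version B (the rewrite author's own statement) =====
-- stated objective: faster
-- what changed: Instead of recounting, for every character occurrence of every word, how many words contain it (three nested scans), B makes one pass building a per-lowercase-character word-containment counter (each word's distinct characters once) and returns the max key by (count, char); it returns the default 'a' when no lowercase letter occurs at all.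
-- intended difference: On inputs whose words contain no lowercase letter at all but do contain a character greater than 'a', A returns the largest such character - an accident of its tie-break update running while every count is 0 - while B returns the default 'a', the intended value when no lowercase letter exists. — e.g. on A_Ex1(["{"]): A returns "{", B returns "a"
import Mathlib
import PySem

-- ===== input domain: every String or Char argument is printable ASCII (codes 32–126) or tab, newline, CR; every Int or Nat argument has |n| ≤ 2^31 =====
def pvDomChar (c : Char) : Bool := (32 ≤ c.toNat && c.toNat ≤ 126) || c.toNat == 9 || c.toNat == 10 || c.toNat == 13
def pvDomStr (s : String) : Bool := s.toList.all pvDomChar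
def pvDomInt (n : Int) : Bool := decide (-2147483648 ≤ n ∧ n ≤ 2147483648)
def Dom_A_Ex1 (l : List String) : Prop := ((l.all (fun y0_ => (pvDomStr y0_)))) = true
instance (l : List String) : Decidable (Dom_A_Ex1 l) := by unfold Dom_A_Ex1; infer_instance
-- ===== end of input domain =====

-- B replaces A's triple nested re-counting with one counting pass (per-lowercase-char word-containment counts) plus an argmax; B returns 'a' instead of A's accidental largest-character fallback when no lowercase letter occurs (stated as D_).


-- ===== PORT A =====
-- inner loop 'for k in range(len(l)): if lettera in l[k] and parola[j].islower(): conta += 1'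
-- ('lettera in l[k]' is 1-char-substring containment; 'parola[j].islower()' on a 1-char ASCII string = Chars.islower)
def aConta (l : List String) (lettera : Char) : Int :=
  l.foldl (fun conta w =>
    if PySem.Chars.isIn [lettera] w.toList && PySem.Chars.islower lettera then conta + 1
    else conta) 0

-- body of the per-character loop: the 'if conta > contamax / elif conta == contamax' update
def aStep (l : List String) (st : Int × Char) (lettera : Char) : Int × Char :=
  let conta := aConta l lettera
  if conta > st.1 then (conta, lettera)
  else if conta == st.1 then
    (if lettera > st.2 then (conta, lettera) else st)
  else st

def A_Ex1 (l : List String) : String :=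
  let st := l.foldl (fun st parola => parola.toList.foldl (aStep l) st) ((0 : Int), 'a')
  String.ofList [st.2]

-- ===== PORT B =====
-- body of 'for c in set(w): if c.islower(): counts[c] = counts.get(c, 0) + 1'
-- (the result does not depend on Python's set iteration order: each distinct char is counted once)
def bWord (d : PySem.Dict Char Int) (w : String) : PySem.Dict Char Int :=
  (PySem.Set.ofList w.toList).foldl
    (fun d c => if PySem.Chars.islower c then d.modify c 0 (· + 1) else d) d

def A_Ex1_alt (l : List String) : String :=
  let counts := l.foldl bWord (PySem.Dict.empty : PySem.Dict Char Int)
  if counts.items = [] then "a"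
  else -- max(counts, key=lambda c: (counts[c], c))
    match PySem.List.max2? counts.keys (fun c => counts.getD c 0) (fun c => c) with
    | some c => String.ofList [c]
    | none => "a"   -- unreachable: counts is non-empty here

-- ===== PRECONDITION & SPEC =====
-- On inputs whose words contain no lowercase letter at all but do contain a character greater than 'a',
-- A returns the largest such character (an accident of its tie-break update running with
-- count 0), while B returns the default 'a', the intended value when no lowercase letter exists.
def D_A_Ex1 (l : List String) : Prop :=
  (l.all (fun w => w.toList.all (fun c => ! PySem.Chars.islower c)) = true) ∧
  (l.any (fun w => w.toList.any (fun c => decide ('a' < c))) = true)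
instance (l : List String) : Decidable (D_A_Ex1 l) := by unfold D_A_Ex1; infer_instance

def Spec_A_Ex1 (l : List String) (out : String) : Prop := ¬ D_A_Ex1 l → out = A_Ex1_alt l
instance (l : List String) (out : String) : Decidable (Spec_A_Ex1 l out) := by unfold Spec_A_Ex1; infer_instance

def pvDiffWitness_A_Ex1 : List String := ["{"]
def pvDiffWitnessOut_A_Ex1 : String × String := ("{", "a")

-- ===== CLAIM (what is proved, stated in full; the proofs are below) =====
def Claim_unchanged_A_Ex1 : Prop := ∀ (l : List String), Dom_A_Ex1 l → Spec_A_Ex1 l (A_Ex1 l)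
def Claim_changed_A_Ex1 : Prop := Dom_A_Ex1 (pvDiffWitness_A_Ex1) ∧ D_A_Ex1 (pvDiffWitness_A_Ex1) ∧ A_Ex1 (pvDiffWitness_A_Ex1) = pvDiffWitnessOut_A_Ex1.1 ∧ A_Ex1_alt (pvDiffWitness_A_Ex1) = pvDiffWitnessOut_A_Ex1.2 ∧ pvDiffWitnessOut_A_Ex1.1 ≠ pvDiffWitnessOut_A_Ex1.2
def Claim_exact_A_Ex1 : Prop := ∀ (l : List String), Dom_A_Ex1 l → D_A_Ex1 l → A_Ex1 l ≠ A_Ex1_alt l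

-- ===== LEMMAS AND PROOFS =====

-- D_ in propositional form
theorem D_iff (l : List String) : D_A_Ex1 l ↔
    ((∀ w ∈ l, ∀ c ∈ w.toList, PySem.Chars.islower c = false) ∧
     (∃ w ∈ l, ∃ c ∈ w.toList, 'a' < c)) := by
  unfold D_A_Ex1
  simp [List.all_eq_true, List.any_eq_true]

-- lexicographic order on (count, char) pairs: exactly A's update rule
def ple (a b : Int × Char) : Prop := a.1 < b.1 ∨ (a.1 = b.1 ∧ a.2 ≤ b.2)

def pmax (a b : Int × Char) : Int × Char :=
  if a.1 < b.1 ∨ (a.1 = b.1 ∧ a.2 < b.2) then b else a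

theorem ple_refl (a : Int × Char) : ple a a := Or.inr ⟨rfl, le_refl _⟩

theorem ple_trans {a b c : Int × Char} (h1 : ple a b) (h2 : ple b c) : ple a c := by
  rcases h1 with h1 | ⟨h1, h1'⟩ <;> rcases h2 with h2 | ⟨h2, h2'⟩
  · exact Or.inl (lt_trans h1 h2)
  · exact Or.inl (h2 ▸ h1)
  · exact Or.inl (h1 ▸ h2)
  · exact Or.inr ⟨h1.trans h2, le_trans h1' h2'⟩

theorem ple_antisymm {a b : Int × Char} (h1 : ple a b) (h2 : ple b a) : a = b := by
  rcases h1 with h1 | ⟨h1, h1'⟩ <;> rcases h2 with h2 | ⟨h2, h2'⟩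
  · exact absurd h1 (not_lt_of_gt h2)
  · exact absurd h1 (by omega)
  · exact absurd h2 (by omega)
  · exact Prod.ext h1 (le_antisymm h1' h2')

theorem ple_pmax_left (a b : Int × Char) : ple a (pmax a b) := by
  unfold pmax; split
  · rename_i h
    rcases h with h | ⟨h, h'⟩
    · exact Or.inl h
    · exact Or.inr ⟨h, le_of_lt h'⟩
  · exact ple_refl a

theorem ple_pmax_right (a b : Int × Char) : ple b (pmax a b) := by
  unfold pmax; split
  · exact ple_refl b
  · rename_i h
    by_cases h1 : b.1 < a.1
    · exact Or.inl h1
    · have hna : ¬ a.1 < b.1 := fun hc => h (Or.inl hc)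
      have heq : a.1 = b.1 := by omega
      have hc2 : ¬ a.2 < b.2 := fun hc => h (Or.inr ⟨heq, hc⟩)
      exact Or.inr ⟨heq.symm, not_lt.1 hc2⟩

theorem pmax_cases (a b : Int × Char) : pmax a b = a ∨ pmax a b = b := by
  unfold pmax; split
  · exact Or.inr rfl
  · exact Or.inl rfl

theorem foldl_pmax_ub (xs : List (Int × Char)) :
    ∀ b, ple b (List.foldl pmax b xs) ∧ ∀ p ∈ xs, ple p (List.foldl pmax b xs) := by
  induction xs with
  | nil => intro b; exact ⟨ple_refl b, by simp⟩
  | cons c cs ih =>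
    intro b
    refine ⟨ple_trans (ple_pmax_left b c) (ih (pmax b c)).1, ?_⟩
    intro p hp
    rcases List.mem_cons.1 hp with rfl | hp
    · exact ple_trans (ple_pmax_right b p) (ih (pmax b p)).1
    · exact (ih (pmax b c)).2 p hp

theorem foldl_pmax_mem (xs : List (Int × Char)) :
    ∀ b, List.foldl pmax b xs = b ∨ List.foldl pmax b xs ∈ xs := by
  induction xs with
  | nil => intro b; exact Or.inl rfl
  | cons c cs ih =>
    intro b
    rcases ih (pmax b c) with h | h
    · rcases pmax_cases b c with h' | h'
      · exact Or.inl (by simpa [h'] using h)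
      · exact Or.inr (by simp [List.foldl]; left; rw [h, h'])
    · exact Or.inr (by simp [List.foldl]; right; exact h)

theorem foldl_pmax_eq {xs ys : List (Int × Char)} {b b' : Int × Char}
    (hx : ∀ p, (p = b ∨ p ∈ xs) → ple p (List.foldl pmax b' ys))
    (hy : ∀ p, (p = b' ∨ p ∈ ys) → ple p (List.foldl pmax b xs)) :
    List.foldl pmax b xs = List.foldl pmax b' ys :=
  ple_antisymm (hx _ (foldl_pmax_mem xs b)) (hy _ (foldl_pmax_mem ys b'))

-- word-containment count and A's key
def cntW (l : List String) (c : Char) : Int := (List.countP (fun w => decide (c ∈ w.toList)) l : Int)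

def keyA (l : List String) (c : Char) : Int × Char :=
  (if PySem.Chars.islower c then cntW l c else 0, c)

theorem singleton_infix (c : Char) (s : List Char) : [c] <:+: s ↔ c ∈ s := by
  constructor
  · intro h; exact h.subset (by simp)
  · intro h
    rcases List.mem_iff_append.1 h with ⟨u, v, rfl⟩
    exact ⟨u, v, by simp⟩

theorem aConta_eq (l : List String) (c : Char) : aConta l c = (keyA l c).1 := by
  unfold aConta keyA
  rw [PySem.List.foldl_count_if]
  by_cases h : PySem.Chars.islower c
  · simp only [h, if_true, zero_add]
    congr 1
    apply List.countP_congr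
    intro w _
    simp [PySem.Chars.isIn_iff_infix, singleton_infix]
  · simp [h, List.countP_false]

theorem aStep_eq (l : List String) (st : Int × Char) (c : Char) :
    aStep l st c = pmax st (keyA l c) := by
  rcases st with ⟨m, d⟩
  unfold aStep pmax
  rw [aConta_eq]
  rcases lt_trichotomy m (keyA l c).1 with h | h | h
  · rw [if_pos (show (keyA l c).1 > m from h), if_pos (Or.inl h)]
    rfl
  · have hb : ((keyA l c).1 == m) = true := by simp [h.symm]
    rw [if_neg (by omega : ¬ (keyA l c).1 > m)]
    simp only [hb, if_true]
    by_cases h3 : c > d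
    · rw [if_pos h3, if_pos (Or.inr ⟨h, (show d < (keyA l c).2 from h3)⟩)]
      rfl
    · rw [if_neg h3, if_neg ?_]
      rintro (hc | ⟨_, hc⟩)
      · omega
      · exact h3 (show d < c from hc)
  · have hb : ((keyA l c).1 == m) = false := by simp; omega
    rw [if_neg (by omega : ¬ (keyA l c).1 > m)]
    simp only [hb, Bool.false_eq_true, if_false]
    rw [if_neg ?_]
    rintro (hc | ⟨hc, _⟩) <;> omega

theorem aStep_fun (l : List String) :
    aStep l = fun st c => pmax st (keyA l c) :=
  funext fun st => funext fun c => aStep_eq l st c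

-- all character occurrences, and A as a lexicographic-max fold
def chars (l : List String) : List Char := l.flatMap String.toList

theorem A_char (l : List String) :
    A_Ex1 l = String.ofList [(List.foldl pmax ((0 : Int), 'a') ((chars l).map (keyA l))).2] := by
  simp only [A_Ex1, chars, aStep_fun]
  rw [← List.foldl_flatMap, ← List.foldl_map]

-- B's counted stream: the lowercase characters, word-deduplicated
def Ls (l : List String) : List Char :=
  l.flatMap (fun w => (PySem.Set.ofList w.toList).filter PySem.Chars.islower)

theorem bWord_eq (d : PySem.Dict Char Int) (w : String) :
    bWord d w = ((PySem.Set.ofList w.toList).filter PySem.Chars.islower).foldl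
      (fun d c => d.modify c 0 (· + 1)) d := by
  unfold bWord
  generalize (PySem.Set.ofList w.toList : List Char) = cs
  induction cs generalizing d with
  | nil => rfl
  | cons c cs ih =>
    by_cases h : PySem.Chars.islower c
    · simp only [List.foldl_cons, List.filter_cons, h, if_true, List.foldl_cons]
      exact ih _
    · have hh : PySem.Chars.islower c = false := by simpa using h
      simp only [List.foldl_cons, List.filter_cons, hh, Bool.false_eq_true, if_false]
      exact ih _

theorem counts_eq (l : List String) :
    l.foldl bWord (PySem.Dict.empty : PySem.Dict Char Int) = PySem.Dict.counter (Ls l) := by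
  rw [PySem.Dict.counter_eq_foldl]
  unfold Ls
  induction l using List.reverseRecOn with
  | nil => rfl
  | append_singleton l w ih =>
    rw [List.foldl_append, List.flatMap_append, List.foldl_append, ih]
    simp [bWord_eq]

theorem mem_Ls (l : List String) (c : Char) :
    c ∈ Ls l ↔ PySem.Chars.islower c = true ∧ ∃ w ∈ l, c ∈ w.toList := by
  simp only [Ls, List.mem_flatMap, List.mem_filter, PySem.Set.mem_ofList]
  constructor
  · rintro ⟨w, hw, hc, hl⟩; exact ⟨hl, w, hw, hc⟩
  · rintro ⟨hl, w, hw, hc⟩; exact ⟨w, hw, hc, hl⟩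

theorem mem_chars (l : List String) (c : Char) :
    c ∈ chars l ↔ ∃ w ∈ l, c ∈ w.toList := by
  simp [chars, List.mem_flatMap]

theorem count_Ls (l : List String) (c : Char) (h : PySem.Chars.islower c = true) :
    (List.count c (Ls l) : Int) = cntW l c := by
  induction l with
  | nil => simp [Ls, cntW]
  | cons w l ih =>
    have hw : List.count c ((PySem.Set.ofList w.toList).filter PySem.Chars.islower)
        = if c ∈ w.toList then 1 else 0 := by
      rw [List.count_filter h]
      by_cases hm : c ∈ w.toList
      · rw [if_pos hm]
        exact List.count_eq_one_of_mem (PySem.Set.nodup_ofList _) ((PySem.Set.mem_ofList _ _).2 hm)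
      · rw [if_neg hm]
        exact List.count_eq_zero_of_not_mem (fun hc => hm ((PySem.Set.mem_ofList _ _).1 hc))
    have hLs : Ls (w :: l) = ((PySem.Set.ofList w.toList).filter PySem.Chars.islower) ++ Ls l := rfl
    rw [hLs, List.count_append, hw]
    unfold cntW at ih ⊢
    rw [List.countP_cons]
    by_cases hm : c ∈ w.toList <;> simp [hm] <;> omega

-- max2? (Python's max with tuple key, first extremal) as a pmax fold over (key, element) pairs
def m2step (f : Char → Int) (acc : Option Char) (x : Char) : Option Char :=
  match acc with
  | none => some x
  | some m => if (decide (f m < f x) || !decide (f x < f m) && decide (m < x)) = true then some x else some m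

theorem max2?_eq_m2step (xs : List Char) (f : Char → Int) :
    PySem.List.max2? xs f (fun c => c) = xs.foldl (m2step f) none := by
  unfold PySem.List.max2? m2step
  congr 1
  funext acc x
  cases acc <;> rfl

theorem m2step_foldl (cs : List Char) (f : Char → Int) :
    ∀ m : Char,
      cs.foldl (m2step f) (some m)
      = some ((List.foldl pmax (f m, m) (cs.map (fun c => (f c, c)))).2) ∧
      (List.foldl pmax (f m, m) (cs.map (fun c => (f c, c)))).1 =
        f ((List.foldl pmax (f m, m) (cs.map (fun c => (f c, c)))).2) := by
  induction cs with
  | nil => intro m; exact ⟨rfl, rfl⟩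
  | cons c cs ih =>
    intro m
    simp only [List.foldl_cons, List.map_cons]
    have hstep : pmax (f m, m) (f c, c) = if (decide (f m < f c) || !decide (f c < f m) && decide (m < c)) = true then ((f c, c) : Int × Char) else (f m, m) := by
      unfold pmax
      by_cases h1 : f m < f c
      · rw [if_pos (Or.inl h1), if_pos (by simp [h1])]
      · by_cases h2 : f c < f m
        · rw [if_neg (by rintro (h | ⟨h, _⟩) <;> omega), if_neg (by simp [h1, h2])]
        · have he : (f m : Int) = f c := by omega
          by_cases h3 : m < c
          · rw [if_pos (Or.inr ⟨he, h3⟩), if_pos (by simp [h2, h3])]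
          · rw [if_neg ?_, if_neg (by simp [h1, h2, h3])]
            rintro (h | ⟨_, h⟩)
            · omega
            · exact h3 h
    by_cases hc : (decide (f m < f c) || !decide (f c < f m) && decide (m < c)) = true
    · rw [if_pos hc] at hstep
      rw [hstep]
      have : m2step f (some m) c = some c := by simp [m2step, hc]
      rw [this]
      exact ih c
    · rw [if_neg hc] at hstep
      rw [hstep]
      have : m2step f (some m) c = some m := by simp [m2step, hc]
      rw [this]
      exact ih m

theorem max2?_cons (k0 : Char) (kt : List Char) (f : Char → Int) :
    PySem.List.max2? (k0 :: kt) f (fun c => c) =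
      some ((List.foldl pmax (f k0, k0) (kt.map (fun c => (f c, c)))).2) := by
  rw [max2?_eq_m2step]
  simp only [List.foldl_cons]
  have : m2step f none k0 = some k0 := rfl
  rw [this]
  exact (m2step_foldl kt f k0).1

-- A's fold over all character occurrences equals the fold over the distinct counted lowercase chars,
-- provided at least one lowercase character occurs
theorem hfold (l : List String) (hL : Ls l ≠ []) :
    List.foldl pmax ((0 : Int), 'a') ((chars l).map (keyA l)) =
    List.foldl pmax ((0 : Int), 'a')
      (List.map (fun k => ((List.count k (Ls l) : Int), k)) (Ls l)) := by
  rcases List.exists_mem_of_ne_nil (Ls l) hL with ⟨d0, hd0⟩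
  have hd0low : PySem.Chars.islower d0 = true := ((mem_Ls l d0).1 hd0).1
  have hd0cnt : (1 : Int) ≤ cntW l d0 := by
    rw [← count_Ls l d0 hd0low]
    have := List.count_pos_iff.2 hd0
    omega
  apply foldl_pmax_eq
  · intro p hp
    have hub := foldl_pmax_ub
      (List.map (fun k => ((List.count k (Ls l) : Int), k)) (Ls l)) ((0 : Int), 'a')
    rcases hp with rfl | hp
    · exact hub.1
    · rcases List.mem_map.1 hp with ⟨c, hc, rfl⟩
      by_cases hcl : PySem.Chars.islower c = true
      · have hmem : c ∈ Ls l := (mem_Ls l c).2 ⟨hcl, (mem_chars l c).1 hc⟩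
        have hk : keyA l c = ((List.count c (Ls l) : Int), c) := by
          simp [keyA, hcl, ← count_Ls l c hcl]
        rw [hk]
        exact hub.2 _ (List.mem_map.2 ⟨c, hmem, rfl⟩)
      · have hk : keyA l c = ((0 : Int), c) := by simp [keyA, hcl]
        rw [hk]
        have hd0mem : ((cntW l d0, d0) : Int × Char) ∈
            List.map (fun k => ((List.count k (Ls l) : Int), k)) (Ls l) := by
          refine List.mem_map.2 ⟨d0, hd0, ?_⟩
          rw [count_Ls l d0 hd0low]
        exact ple_trans (Or.inl (by omega)) (hub.2 _ hd0mem)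
  · intro p hp
    have hub := foldl_pmax_ub ((chars l).map (keyA l)) ((0 : Int), 'a')
    rcases hp with rfl | hp
    · exact hub.1
    · rcases List.mem_map.1 hp with ⟨c, hc, rfl⟩
      rcases (mem_Ls l c).1 hc with ⟨hcl, w, hw, hcw⟩
      have hk : keyA l c = ((List.count c (Ls l) : Int), c) := by
        simp [keyA, hcl, ← count_Ls l c hcl]
      rw [← hk]
      exact hub.2 _ (List.mem_map.2 ⟨c, (mem_chars l c).2 ⟨w, hw, hcw⟩, rfl⟩)

-- the no-lowercase case: a pmax fold over (0, c) pairs is a running char max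
theorem pair_fold (cs : List Char) :
    ∀ x, List.foldl pmax ((0 : Int), x) (cs.map (fun c => ((0 : Int), c))) =
      ((0 : Int), List.foldl (fun o c => if c > o then c else o) x cs) := by
  induction cs with
  | nil => intro x; rfl
  | cons c cs ih =>
    intro x
    simp only [List.map_cons, List.foldl_cons]
    have hstep : pmax ((0 : Int), x) ((0 : Int), c) = ((0 : Int), if c > x then c else x) := by
      unfold pmax
      by_cases h : x < c
      · rw [if_pos (Or.inr ⟨rfl, h⟩), if_pos (show c > x from h)]
      · rw [if_neg ?_, if_neg (show ¬ c > x from h)]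
        rintro (hc | ⟨_, hc⟩)
        · omega
        · exact h hc
    rw [hstep, ih]

-- main equality outside D_
theorem main_eq (l : List String) (hnd : ¬ D_A_Ex1 l) : A_Ex1 l = A_Ex1_alt l := by
  rw [A_char]
  simp only [A_Ex1_alt]
  rw [counts_eq]
  by_cases hL : Ls l = []
  · -- no lowercase character occurs anywhere; ¬ D_ gives: every char ≤ 'a'
    have hitems : (PySem.Dict.counter (Ls l)).items = [] := by rw [hL]; rfl
    rw [if_pos hitems]
    have hnl : ∀ c ∈ chars l, PySem.Chars.islower c = false := by
      intro c hc
      by_contra h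
      have h' : PySem.Chars.islower c = true := by simpa using h
      have hmem : c ∈ Ls l := (mem_Ls l c).2 ⟨h', (mem_chars l c).1 hc⟩
      rw [hL] at hmem
      exact absurd hmem (List.not_mem_nil)
    have hle : ∀ c ∈ chars l, ¬ ('a' < c) := by
      intro c hc hgt
      apply hnd
      rw [D_iff]
      refine ⟨?_, ?_⟩
      · intro w hw d hd
        exact hnl d ((mem_chars l d).2 ⟨w, hw, hd⟩)
      · rcases (mem_chars l c).1 hc with ⟨w, hw, hcw⟩
        exact ⟨w, hw, c, hcw, hgt⟩
    have hmap : (chars l).map (keyA l) = (chars l).map (fun c => ((0 : Int), c)) :=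
      List.map_congr_left (fun c hc => by simp [keyA, hnl c hc])
    rw [hmap, pair_fold]
    have hrun : List.foldl (fun o c => if c > o then c else o) 'a' (chars l) = 'a' := by
      have : ∀ cs : List Char, (∀ c ∈ cs, ¬ ('a' < c)) →
          List.foldl (fun o c => if c > o then c else o) 'a' cs = 'a' := by
        intro cs
        induction cs with
        | nil => intro _; rfl
        | cons c cs ih =>
          intro h
          simp only [List.foldl_cons, if_neg (h c (by simp))]
          exact ih (fun d hd => h d (by simp [hd]))
      exact this _ hle
    rw [hrun]
  · -- some lowercase character occurs: counts is non-empty, B takes the argmax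
    have hitems := PySem.Dict.items_counter (Ls l)
    rcases List.exists_mem_of_ne_nil (Ls l) hL with ⟨d0, hd0⟩
    have hset : PySem.Set.ofList (Ls l) ≠ [] := by
      intro hc
      have := (PySem.Set.mem_ofList (Ls l) d0).2 hd0
      rw [hc] at this
      exact absurd this (List.not_mem_nil)
    have hne : (PySem.Dict.counter (Ls l)).items ≠ [] := by
      rw [hitems]
      simpa using hset
    rw [if_neg hne]
    -- normalise keys and getD of the counter
    have hkeys : (PySem.Dict.counter (Ls l)).keys = PySem.Set.ofList (Ls l) :=
      PySem.Dict.keys_counter (Ls l)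
    have hgetD : ∀ c, (PySem.Dict.counter (Ls l)).getD c 0 = (List.count c (Ls l) : Int) :=
      fun c => PySem.Dict.getD_counter (Ls l) c
    -- the key list is non-empty: destructure it
    rcases hk : (PySem.Set.ofList (Ls l) : List Char) with _ | ⟨k0, kt⟩
    · exact absurd hk hset
    -- fold over all chars = fold over the distinct lowercase chars (as a set)
    have hAfold : List.foldl pmax ((0 : Int), 'a') ((chars l).map (keyA l)) =
        List.foldl pmax ((0 : Int), 'a')
          (List.map (fun k => ((List.count k (Ls l) : Int), k)) (PySem.Set.ofList (Ls l))) := by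
      rw [hfold l hL]
      apply foldl_pmax_eq
      · intro p hp
        have hub := foldl_pmax_ub
          (List.map (fun k => ((List.count k (Ls l) : Int), k)) (PySem.Set.ofList (Ls l)))
          ((0 : Int), 'a')
        rcases hp with rfl | hp
        · exact hub.1
        · rcases List.mem_map.1 hp with ⟨c, hc, rfl⟩
          exact hub.2 _ (List.mem_map.2 ⟨c, (PySem.Set.mem_ofList _ _).2 hc, rfl⟩)
      · intro p hp
        have hub := foldl_pmax_ub
          (List.map (fun k => ((List.count k (Ls l) : Int), k)) (Ls l)) ((0 : Int), 'a')
        rcases hp with rfl | hp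
        · exact hub.1
        · rcases List.mem_map.1 hp with ⟨c, hc, rfl⟩
          exact hub.2 _ (List.mem_map.2 ⟨c, (PySem.Set.mem_ofList _ _).1 hc, rfl⟩)
    -- the initial (0,'a') is beaten by the first key (its count is ≥ 1)
    have hk0 : k0 ∈ Ls l := (PySem.Set.mem_ofList (Ls l) k0).1 (by rw [hk]; simp)
    have hk0cnt : (1 : Int) ≤ (List.count k0 (Ls l) : Int) := by
      have := List.count_pos_iff.2 hk0
      omega
    have hfirst : pmax ((0 : Int), 'a') ((List.count k0 (Ls l) : Int), k0) =
        ((List.count k0 (Ls l) : Int), k0) := by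
      unfold pmax
      rw [if_pos (Or.inl (by omega))]
    -- B's max2? computes the same pmax fold
    have hf : (fun c => (PySem.Dict.counter (Ls l)).getD c 0) =
        (fun c => (List.count c (Ls l) : Int)) := funext hgetD
    rw [hkeys, hk, hf, max2?_cons]
    rw [hAfold, hk]
    simp only [List.map_cons, List.foldl_cons, hfirst]

theorem A_ne_alt (l : List String) (_hdom : Dom_A_Ex1 l) (hd : D_A_Ex1 l) :
    A_Ex1 l ≠ A_Ex1_alt l := by
  rcases (D_iff l).1 hd with ⟨hP, w, hw, c, hcw, hgt⟩
  -- B returns "a": no lowercase char, counts empty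
  have hL : Ls l = [] := by
    rcases hLs : Ls l with _ | ⟨d, ds⟩
    · rfl
    · have hd : d ∈ Ls l := by rw [hLs]; simp
      rcases (mem_Ls l d).1 hd with ⟨hdl, w', hw', hdw'⟩
      rw [hP w' hw' d hdw'] at hdl
      exact absurd hdl (by simp)
  have hB : A_Ex1_alt l = "a" := by
    simp only [A_Ex1_alt]
    rw [counts_eq, hL]
    rfl
  -- A returns the running max char, which is > 'a'
  rw [A_char, hB]
  have hmap : (chars l).map (keyA l) = (chars l).map (fun c => ((0 : Int), c)) := by
    apply List.map_congr_left
    intro d hd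
    rcases (mem_chars l d).1 hd with ⟨w', hw', hdw'⟩
    simp [keyA, hP w' hw' d hdw']
  rw [hmap, pair_fold]
  have hcmem : c ∈ chars l := (mem_chars l c).2 ⟨w, hw, hcw⟩
  -- the running max is ≥ every element
  have hub : ∀ cs : List Char, ∀ x, x ≤ List.foldl (fun o c => if c > o then c else o) x cs ∧
      ∀ d ∈ cs, d ≤ List.foldl (fun o c => if c > o then c else o) x cs := by
    intro cs
    induction cs with
    | nil => intro x; exact ⟨le_refl x, by simp⟩
    | cons d ds ih =>
      intro x
      have hstep : x ≤ (if d > x then d else x) ∧ d ≤ (if d > x then d else x) := by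
        split_ifs with h
        · exact ⟨le_of_lt h, le_refl d⟩
        · exact ⟨le_refl x, not_lt.1 h⟩
      refine ⟨le_trans hstep.1 (ih _).1, ?_⟩
      intro e he
      rcases List.mem_cons.1 he with rfl | he
      · exact le_trans hstep.2 (ih _).1
      · exact (ih _).2 e he
  have hge : c ≤ List.foldl (fun o c => if c > o then c else o) 'a' (chars l) :=
    (hub (chars l) 'a').2 c hcmem
  have hne : List.foldl (fun o c => if c > o then c else o) 'a' (chars l) ≠ 'a' := by
    intro he
    rw [he] at hge
    exact absurd (lt_of_lt_of_le hgt hge) (lt_irrefl _)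
  intro hcontra
  apply hne
  have := congrArg String.toList hcontra
  simp only [String.toList_ofList] at this
  simpa using this

-- ===== VERDICT (by name: the statement is the Claim_ definition above) =====
theorem A_Ex1_spec : Claim_unchanged_A_Ex1 := by
  intro l _
  unfold Spec_A_Ex1
  intro hnd
  exact main_eq l hnd

theorem A_Ex1_changed : Claim_changed_A_Ex1 := by
  unfold Claim_changed_A_Ex1
  refine ⟨by decide, by decide, by decide, by decide, by decide⟩

theorem A_Ex1_tight : Claim_exact_A_Ex1 := by
  intro l hdom hd
  exact A_ne_alt l hdom hd
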